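-- pv_equiv track=rewrite | github.com/Xamacardoso/bee | PYTHON/1534.py | gerar_matriz123
-- ===== SOURCE A (Python) =====
-- def gerar_matriz123(n):
--     matriz = [[3 for i in range(n)] for j in range(n)]
--     for i in range(len(matriz)):
--         for j in range(len(matriz)):
--             if i == j:
--                 matriz[i][j] = 1
--
--             if i + j == len(matriz) - 1:
--                 matriz[i][j] = 2
--
--
--     return matriz
-- ===== SOURCE B (Python) =====
-- def gerar_matriz123(n):
--     # Build only the top half of the rows directly; the bottom half is the
--     # mirror image (each bottom row is the reverse of its partner row).
--     if n <= 0: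
--         return []
--     half = n // 2
--     top = []
--     for i in range(half):
--         row = [3] * n
--         row[i] = 1
--         row[n - 1 - i] = 2
--         top.append(row)
--     middle = [[3] * half + [2] + [3] * half] if n % 2 else []
--     return top + middle + [row[::-1] for row in reversed(top)]
-- ===== Notes on version B (the rewrite author's own statement) =====
-- stated objective: alternative
-- what changed: B constructs only the top half of the rows by direct two-cell assignment and obtains the bottom half as the mirror image (reversed rows in reverse order), instead of A's fill-with-3 grid followed by a full n x n sweep testing both diagonal conditions on every cell.
import Mathlib
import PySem

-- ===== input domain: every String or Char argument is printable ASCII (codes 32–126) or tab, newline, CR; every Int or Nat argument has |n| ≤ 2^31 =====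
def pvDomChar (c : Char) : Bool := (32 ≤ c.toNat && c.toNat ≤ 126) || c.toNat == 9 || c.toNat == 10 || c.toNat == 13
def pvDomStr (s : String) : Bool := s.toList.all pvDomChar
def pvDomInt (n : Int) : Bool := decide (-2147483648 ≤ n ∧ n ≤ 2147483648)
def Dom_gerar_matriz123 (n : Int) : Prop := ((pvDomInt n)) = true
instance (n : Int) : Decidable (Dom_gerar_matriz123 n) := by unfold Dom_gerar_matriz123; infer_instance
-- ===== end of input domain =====

-- B builds only the top half of the rows by direct two-cell assignment and mirrors it
-- (reversed rows in reverse order) for the bottom half (objective: alternative).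


-- ===== PORT A =====
-- one iteration of A's inner j-loop: matriz[i][j]=1 if i==j, then matriz[i][j]=2 if i+j==len(matriz)-1
def pvStepA (i : Nat) (m : List (List Int)) (j : Nat) : List (List Int) :=
  let m1 := if i = j then m.modify i (fun row => row.set j 1) else m
  if (i : Int) + (j : Int) = (m1.length : Int) - 1 then m1.modify i (fun row => row.set j 2) else m1

def gerar_matriz123 (n : Int) : List (List Int) :=
  let matriz := (PySem.List.pyRange 0 n 1).map (fun _ => (PySem.List.pyRange 0 n 1).map (fun _ => (3 : Int)))
  (List.range matriz.length).foldl (fun m i => (List.range m.length).foldl (pvStepA i) m) matriz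

-- ===== PORT B =====
def gerar_matriz123_alt (n : Int) : List (List Int) :=
  if n ≤ 0 then []
  else
    let half := PySem.Int.floordiv n 2
    -- row[i] = 1; row[n-1-i] = 2: both indices are provably in range, so List.set is exact here
    let top := (PySem.List.pyRange 0 half 1).foldl
      (fun acc i => acc ++ [((List.replicate n.toNat (3 : Int)).set i.toNat 1).set (n - 1 - i).toNat 2]) []
    let middle := if PySem.Int.mod n 2 ≠ 0 then
        [List.replicate half.toNat (3 : Int) ++ [2] ++ List.replicate half.toNat (3 : Int)] else []
    top ++ middle ++ (top.reverse.map (fun row => row.reverse))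

-- ===== PRECONDITION & SPEC =====
def Spec_gerar_matriz123 (n : Int) (out : List (List Int)) : Prop := out = gerar_matriz123_alt n
instance (n : Int) (out : List (List Int)) : Decidable (Spec_gerar_matriz123 n out) := by unfold Spec_gerar_matriz123; infer_instance

-- ===== CLAIM (what is proved, stated in full; the proofs are below) =====
def Claim_equal_gerar_matriz123 : Prop := ∀ (n : Int), Dom_gerar_matriz123 n → Spec_gerar_matriz123 n (gerar_matriz123 n)

-- ===== LEMMAS AND PROOFS =====

-- one inner-loop iteration of A acting on a single row
def pvRowStep (L i : Nat) (row : List Int) (j : Nat) : List Int :=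
  let r1 := if i = j then row.set j 1 else row
  if (i : Int) + (j : Int) = (L : Int) - 1 then r1.set j 2 else r1

-- the closed-form cell value both programs produce
def pvCell (K i j : Nat) : Int :=
  if (i : Int) + (j : Int) = (K : Int) - 1 then 2 else if i = j then 1 else 3

-- the closed-form row
def pvRowC (K i : Nat) : List Int := (List.range K).map (pvCell K i)

theorem pv_set_mid {a : Type} (pref : List a) (x v : a) (rest : List a) :
    (pref ++ x :: rest).set pref.length v = pref ++ v :: rest := by
  simp

theorem pv_set_mid' {a : Type} {t : Nat} (pref : List a) (x v : a) (rest : List a)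
    (h : pref.length = t) : (pref ++ x :: rest).set t v = pref ++ v :: rest := by
  rw [← h, pv_set_mid]

theorem pv_modify_mid (pref : List (List Int)) (x : List Int) (rest : List (List Int))
    (g : List Int → List Int) :
    (pref ++ x :: rest).modify pref.length g = pref ++ g x :: rest := by
  rw [List.modify_eq_set_getElem?]
  have h : (pref ++ x :: rest)[pref.length]? = some x := by simp
  rw [h]
  simp

-- one step of A's inner loop on m = pref ++ row :: rest acts only on that row
theorem pv_stepA_mid (pref : List (List Int)) (row : List Int) (rest : List (List Int))
    (i j L : Nat) (hi : i = pref.length) (hL : (pref ++ row :: rest).length = L) :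
    pvStepA i (pref ++ row :: rest) j = pref ++ pvRowStep L i row j :: rest := by
  subst hi
  simp only [pvStepA, pvRowStep]
  by_cases hij : pref.length = j
  · subst hij
    rw [if_pos rfl, if_pos rfl, pv_modify_mid]
    have hL' : (((pref ++ row.set pref.length 1 :: rest).length : Nat) : Int) = (L : Int) := by
      rw [← hL]; simp
    rw [hL']
    by_cases hc : (pref.length : Int) + (pref.length : Int) = (L : Int) - 1
    · rw [if_pos hc, if_pos hc, pv_modify_mid]
    · rw [if_neg hc, if_neg hc]
  · rw [if_neg hij, if_neg hij]
    have hL' : (((pref ++ row :: rest).length : Nat) : Int) = (L : Int) := by rw [hL]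
    rw [hL']
    by_cases hc : (pref.length : Int) + (j : Int) = (L : Int) - 1
    · rw [if_pos hc, if_pos hc, pv_modify_mid]
    · rw [if_neg hc, if_neg hc]

-- the whole inner loop on m = pref ++ row :: rest acts only on that row
theorem pv_inner_mid (js : List Nat) (pref : List (List Int)) (row : List Int)
    (rest : List (List Int)) (i L : Nat) (hi : i = pref.length)
    (hL : (pref ++ row :: rest).length = L) :
    js.foldl (pvStepA i) (pref ++ row :: rest)
      = pref ++ (js.foldl (pvRowStep L i) row) :: rest := by
  induction js generalizing row with
  | nil => simp
  | cons j js ih =>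
    rw [List.foldl_cons, List.foldl_cons, pv_stepA_mid pref row rest i j L hi hL]
    exact ih _ (by rw [← hL]; simp)

-- the inner loop on a fresh all-3 row of length K produces the closed-form row
theorem pv_row_closed (K i : Nat) (t : Nat) (ht : t ≤ K) :
    (List.range t).foldl (pvRowStep K i) (List.replicate K (3 : Int))
      = (List.range t).map (pvCell K i) ++ List.replicate (K - t) (3 : Int) := by
  induction t with
  | zero => simp
  | succ t ih =>
    have ht' : t ≤ K := Nat.le_of_succ_le ht
    rw [List.range_succ, List.foldl_append, ih ht', List.foldl_cons, List.foldl_nil]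
    have hrep : List.replicate (K - t) (3 : Int) = 3 :: List.replicate (K - (t+1)) (3 : Int) := by
      rw [← List.replicate_succ]; congr 1; omega
    rw [hrep]
    have hlen : ((List.range t).map (pvCell K i)).length = t := by simp
    simp only [pvRowStep]
    by_cases hij : i = t
    · subst hij
      rw [if_pos rfl, pv_set_mid' _ _ _ _ hlen]
      by_cases hc : (i : Int) + (i : Int) = (K : Int) - 1
      · rw [if_pos hc, pv_set_mid' _ _ _ _ hlen]
        simp [pvCell, hc]
      · rw [if_neg hc]
        simp [pvCell, hc]
    · rw [if_neg hij]
      by_cases hc : (i : Int) + (t : Int) = (K : Int) - 1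
      · rw [if_pos hc, pv_set_mid' _ _ _ _ hlen]
        simp [pvCell, hc]
      · rw [if_neg hc]
        simp [pvCell, hc, hij]

-- the outer loop on the all-3 K×K grid produces the closed-form grid, row by row
theorem pv_outer_closed (K : Nat) (t : Nat) (ht : t ≤ K) :
    (List.range t).foldl (fun m i => (List.range m.length).foldl (pvStepA i) m)
        (List.replicate K (List.replicate K (3 : Int)))
      = (List.range t).map (fun i => (List.range K).map (pvCell K i))
        ++ List.replicate (K - t) (List.replicate K (3 : Int)) := by
  induction t with
  | zero => simp
  | succ t ih =>
    have ht' : t ≤ K := Nat.le_of_succ_le ht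
    rw [List.range_succ, List.foldl_append, ih ht', List.foldl_cons, List.foldl_nil]
    have hrep : List.replicate (K - t) (List.replicate K (3 : Int))
        = List.replicate K (3 : Int) :: List.replicate (K - (t+1)) (List.replicate K (3 : Int)) := by
      rw [← List.replicate_succ]; congr 1; omega
    rw [hrep]
    have hlenp : ((List.range t).map (fun i => (List.range K).map (pvCell K i))).length = t := by simp
    have hlenM : ((List.range t).map (fun i => (List.range K).map (pvCell K i))
        ++ List.replicate K (3 : Int) :: List.replicate (K - (t+1)) (List.replicate K (3 : Int))).length = K := by
      simp; omega
    rw [hlenM, pv_inner_mid _ _ _ _ t K hlenp.symm hlenM,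
        pv_row_closed K t K le_rfl]
    simp

-- A equals the closed-form grid
theorem pv_a_closed (n : Int) :
    gerar_matriz123 n = (List.range n.toNat).map (fun i => pvRowC n.toNat i) := by
  by_cases hn : 0 < n
  · unfold gerar_matriz123
    have hr0 : (PySem.List.pyRange 0 n 1).map (fun _ => (PySem.List.pyRange 0 n 1).map (fun _ => (3 : Int)))
        = List.replicate n.toNat (List.replicate n.toNat (3 : Int)) := by
      have hlen : (PySem.List.pyRange 0 n 1).length = n.toNat := by
        rw [PySem.List.length_pyRange_one]; simp
      rw [List.map_const', List.map_const', hlen]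
    simp only [hr0]
    have hlen2 : (List.replicate n.toNat (List.replicate n.toNat (3 : Int))).length = n.toNat := by simp
    rw [hlen2, pv_outer_closed n.toNat n.toNat le_rfl]
    simp [pvRowC]
  · have hr : PySem.List.pyRange 0 n 1 = [] := by
      apply PySem.List.pyRange_one_eq_nil; omega
    have hK : n.toNat = 0 := by omega
    unfold gerar_matriz123
    rw [hr, hK]
    simp

-- the foldl-append loop of B is a map
theorem pv_foldl_append_map {a b : Type} (f : a → b) (l : List a) (acc : List b) :
    l.foldl (fun s x => s ++ [f x]) acc = acc ++ l.map f := by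
  induction l generalizing acc with
  | nil => simp
  | cons x xs ih => simp [ih]

-- B's directly-built top row is the closed-form row (any i < K)
theorem pv_toprow_closed (K i : Nat) (hi : i < K) :
    ((List.replicate K (3 : Int)).set i 1).set (K - 1 - i) 2 = pvRowC K i := by
  apply List.ext_getElem
  · simp [pvRowC]
  · intro j hj hj'
    have hjK : j < K := by simpa [pvRowC] using hj'
    rw [List.getElem_set, List.getElem_set, List.getElem_replicate]
    simp only [pvRowC, List.getElem_map, List.getElem_range, pvCell]
    split_ifs <;> omega

-- the reverse of a closed-form row is the mirror closed-form row
theorem pv_row_reverse (K i : Nat) (hi : i < K) :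
    (pvRowC K i).reverse = pvRowC K (K - 1 - i) := by
  apply List.ext_getElem
  · simp [pvRowC]
  · intro j hj hj'
    have hjK : j < K := by simpa [pvRowC] using hj'
    rw [List.getElem_reverse]
    simp only [pvRowC, List.getElem_map, List.getElem_range, List.length_map,
      List.length_range, pvCell]
    split_ifs <;> omega

-- the middle row of an odd-size grid is the closed-form row at index h
theorem pv_midrow_closed (h : Nat) :
    List.replicate h (3 : Int) ++ [2] ++ List.replicate h (3 : Int) = pvRowC (2*h+1) h := by
  apply List.ext_getElem
  · simp [pvRowC]; omega
  · intro j hj hj'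
    have hjK : j < 2*h+1 := by simpa [pvRowC] using hj'
    simp only [pvRowC, List.getElem_map, List.getElem_range, pvCell]
    rcases Nat.lt_trichotomy j h with hlt | heq | hgt
    · rw [List.getElem_append_left (by simpa using by omega)]
      rw [List.getElem_append_left (by simpa using hlt), List.getElem_replicate]
      split_ifs <;> omega
    · subst heq
      rw [List.getElem_append_left (by simp)]
      rw [List.getElem_append_right (by simp)]
      simp only [List.length_replicate, Nat.sub_self, List.getElem_cons_zero]
      rw [if_pos (by push_cast; omega)]
    · rw [List.getElem_append_right (by simp <;> omega)]
      simp only [List.length_append, List.length_replicate, List.length_cons, List.length_nil]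
      rw [List.getElem_replicate]
      split_ifs <;> omega

-- assembling top ++ middle ++ mirrored-top gives all K closed-form rows
theorem pv_assemble (K h : Nat) (hh : h = K / 2) :
    (List.range h).map (fun i => pvRowC K i)
      ++ (if K % 2 = 1 then [pvRowC K h] else [])
      ++ (List.range h).map (fun t => pvRowC K (K - 1 - (h - 1 - t)))
    = (List.range K).map (fun i => pvRowC K i) := by
  by_cases ho : K % 2 = 1
  · rw [if_pos ho]
    apply List.ext_getElem
    · simp; omega
    · intro i hi hi'
      have hiK : i < K := by simpa using hi'
      simp only [List.getElem_map, List.getElem_range]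
      by_cases hih : i < h
      · rw [List.getElem_append_left (by simp <;> omega),
            List.getElem_append_left (by simpa using hih)]
        simp
      · by_cases him : i = h
        · subst him
          rw [List.getElem_append_left (by simp),
              List.getElem_append_right (by simp)]
          simp
        · rw [List.getElem_append_right (by simp <;> omega)]
          simp only [List.length_append, List.length_map, List.length_range,
            List.length_cons, List.length_nil, List.getElem_map, List.getElem_range]
          congr 1
          omega
  · have ho0 : K % 2 = 0 := by omega
    rw [if_neg ho]
    apply List.ext_getElem
    · simp; omega
    · intro i hi hi'
      have hiK : i < K := by simpa using hi'
      simp only [List.append_nil, List.getElem_map, List.getElem_range]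
      by_cases hih : i < h
      · rw [List.getElem_append_left (by simpa using hih)]
        simp
      · rw [List.getElem_append_right (by simp <;> omega)]
        simp only [List.length_map, List.length_range, List.getElem_map, List.getElem_range]
        congr 1
        omega

-- B equals the closed-form grid
theorem pv_b_closed (n : Int) :
    gerar_matriz123_alt n = (List.range n.toNat).map (fun i => pvRowC n.toNat i) := by
  by_cases hn : 0 < n
  · set K := n.toNat with hKdef
    have hnK : n = (K : Int) := by omega
    have hKpos : 0 < K := by omega
    set h := K / 2 with hhdef
    unfold gerar_matriz123_alt
    rw [if_neg (by omega)]
    have hfd : PySem.Int.floordiv n 2 = (h : Int) := by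
      rw [hnK]; exact_mod_cast PySem.Int.floordiv_natCast K 2
    have hmod : PySem.Int.mod n 2 = ((K % 2 : Nat) : Int) := by
      rw [hnK]; exact_mod_cast PySem.Int.mod_natCast K 2
    simp only [hfd, hmod]
    have hrange : PySem.List.pyRange 0 (h : Int) 1 = (List.range h).map (fun k : Nat => (k : Int)) := by
      rw [PySem.List.pyRange_one]; simp
    rw [hrange]
    have htop : ((List.range h).map (fun k : Nat => (k : Int))).foldl
        (fun acc i => acc ++ [((List.replicate n.toNat (3 : Int)).set i.toNat 1).set (n - 1 - i).toNat 2]) []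
        = (List.range h).map (fun i => pvRowC K i) := by
      rw [pv_foldl_append_map]
      simp only [List.map_map, List.nil_append]
      apply List.map_congr_left
      intro i hi
      have hiK : i < K := by
        have : i < h := List.mem_range.mp hi
        omega
      simp only [Function.comp]
      have h1 : ((i : Int)).toNat = i := by simp
      have h2 : (n - 1 - (i : Int)).toNat = K - 1 - i := by omega
      rw [h1, h2, ← hKdef, pv_toprow_closed K i hiK]
    rw [htop]
    have hbot : ((List.range h).map (fun i => pvRowC K i)).reverse.map (fun row => row.reverse)
        = (List.range h).map (fun t => pvRowC K (K - 1 - (h - 1 - t))) := by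
      apply List.ext_getElem
      · simp
      · intro t ht ht'
        have hth : t < h := by simpa using ht'
        rw [List.getElem_map, List.getElem_reverse]
        simp only [List.length_map, List.length_range, List.getElem_map, List.getElem_range]
        exact pv_row_reverse K (h - 1 - t) (by omega)
    rw [hbot]
    have hmid : (if ((K % 2 : Nat) : Int) ≠ 0 then
        [List.replicate ((h : Int)).toNat (3 : Int) ++ [2] ++ List.replicate ((h : Int)).toNat (3 : Int)] else [])
        = (if K % 2 = 1 then [pvRowC K h] else []) := by
      by_cases ho : K % 2 = 1
      · rw [if_pos (by simp [ho]), if_pos ho]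
        have hK2 : K = 2 * h + 1 := by omega
        rw [hK2]
        simp only [Int.toNat_natCast]
        rw [pv_midrow_closed h]
      · have ho0 : K % 2 = 0 := by omega
        rw [if_neg (by simp [ho0]), if_neg ho]
    rw [hmid]
    exact pv_assemble K h hhdef
  · have hK : n.toNat = 0 := by omega
    unfold gerar_matriz123_alt
    rw [if_pos (by omega), hK]
    simp

-- ===== VERDICT (by name: the statement is the Claim_ definition above) =====
theorem gerar_matriz123_spec : Claim_equal_gerar_matriz123 := by
  intro n _
  unfold Spec_gerar_matriz123
  rw [pv_a_closed, pv_b_closed]
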